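-- pv_equiv track=rewrite | github.com/hieuchauhoa/AI | nhithucNewton-Phuc.py | nhithucnewton
-- ===== SOURCE A (Python) =====
-- def binomialCoef(n, k): #tính tổ hợp nCk
--     C = [0 for x in range(k+1)]
--     C[0] = 1
--     for i in range(n+1):
--         for j in range(min(i, k),0,-1):
--             C[j] = C[j] + C[j-1]
--     return C[k]
--
-- def nhithucnewton(a,b,n): #tính nhị thức (a+b)^n
--     c=0
--     k=0
--     while(k!=n):
--         c=c+binomialCoef(n, k)*(a**(n-k))*(b**k)
--         k=k+1
--     c=c+binomialCoef(n, k)*(a**(n-k))*(b**k)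
--     return c
-- ===== SOURCE B (Python) =====
-- def nhithucnewton(a, b, n):  # tính nhị thức (a+b)^n
--     # The binomial theorem: sum_{k=0}^{n} C(n,k) a^(n-k) b^k == (a+b)^n, computed directly.
--     return (a + b) ** n
-- ===== Notes on version B (the rewrite author's own statement) =====
-- stated objective: faster
-- what changed: Replaces the term-by-term binomial sum, where each coefficient is recomputed from scratch by a Pascal-triangle DP, with the closed form (a+b)**n; Pre_ requires n >= 0, since A's while loop never terminates for n < 0.
import Mathlib
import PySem

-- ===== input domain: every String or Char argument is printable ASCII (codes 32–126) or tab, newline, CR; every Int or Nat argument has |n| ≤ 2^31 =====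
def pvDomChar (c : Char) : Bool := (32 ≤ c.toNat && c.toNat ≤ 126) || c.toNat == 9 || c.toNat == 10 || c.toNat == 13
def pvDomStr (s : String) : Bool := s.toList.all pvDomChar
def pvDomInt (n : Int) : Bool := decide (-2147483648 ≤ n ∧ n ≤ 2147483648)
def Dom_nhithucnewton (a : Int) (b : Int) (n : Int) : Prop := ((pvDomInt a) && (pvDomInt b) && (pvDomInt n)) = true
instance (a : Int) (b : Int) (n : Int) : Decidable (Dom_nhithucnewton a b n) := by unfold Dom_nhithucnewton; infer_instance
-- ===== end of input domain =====

-- B replaces A's O(n^3) term-by-term binomial sum (each coefficient recomputed by a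
-- Pascal-triangle DP) with the closed form (a+b)**n; equal for all n ≥ 0 (Pre_).

-- ===== PORT A =====
-- inner loop of binomialCoef: `for j in range(min(i,k),0,-1): C[j] = C[j] + C[j-1]`,
-- descending from j = m down to 1; all indices are in range (1 ≤ j ≤ m < len C), so
-- List.set / List.getD are exact here.
def bcInner : Nat → List Int → List Int
  | 0, C => C
  | j + 1, C => bcInner j (C.set (j + 1) (C.getD (j + 1) 0 + C.getD j 0))

-- binomialCoef(n, k): C = [0]*(k+1); C[0] = 1; for i in range(n+1): <inner>; return C[k]
-- (A only calls it with 0 ≤ k ≤ n; exact there, where k+1 > 0 and all indices fit)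
def binomialCoefA (n k : Int) : Int :=
  ((List.range (n.toNat + 1)).foldl (fun C i => bcInner (min i k.toNat) C)
      (((List.replicate (k.toNat + 1) (0 : Int)).set 0 1))).getD k.toNat 0

-- the while loop of nhithucnewton, k counting up from 0; Python's guard `k != n` is
-- `k < n` on every reachable state once 0 ≤ n (for n < 0 Python diverges — excluded
-- by Pre_); exponent n-k satisfies n-k ≥ 0 there, so ^(…).toNat is exact.
def nhLoopA (a b n : Int) (k : Nat) (c : Int) : Int :=
  if (k : Int) < n then
    nhLoopA a b n (k + 1)
      (c + binomialCoefA n (k : Int) * a ^ (n - (k : Int)).toNat * b ^ k)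
  else
    c + binomialCoefA n (k : Int) * a ^ (n - (k : Int)).toNat * b ^ k
termination_by (n - (k : Int)).toNat
decreasing_by omega

def nhithucnewton (a : Int) (b : Int) (n : Int) : Int := nhLoopA a b n 0 0

-- ===== PORT B =====
-- Source B: return (a + b) ** n   (exact for n ≥ 0, which Pre_ guarantees)
def nhithucnewton_alt (a : Int) (b : Int) (n : Int) : Int := (a + b) ^ n.toNat

-- ===== PRECONDITION & SPEC =====
-- Pre_ excludes n < 0, on which A's while loop `while k != n` (k counting up from 0)
-- never terminates, so A returns on exactly the inputs Pre_ admits.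
def Pre_nhithucnewton (a : Int) (b : Int) (n : Int) : Prop := 0 ≤ n
instance (a : Int) (b : Int) (n : Int) : Decidable (Pre_nhithucnewton a b n) := by
  unfold Pre_nhithucnewton; infer_instance

def pvWitness_nhithucnewton : Int × Int × Int := (2, 3, 4)

def Spec_nhithucnewton (a : Int) (b : Int) (n : Int) (out : Int) : Prop := out = nhithucnewton_alt a b n
instance (a : Int) (b : Int) (n : Int) (out : Int) : Decidable (Spec_nhithucnewton a b n out) := by unfold Spec_nhithucnewton; infer_instance

-- ===== CLAIM (what is proved, stated in full; the proofs are below) =====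
def Claim_equal_nhithucnewton : Prop := ∀ (a : Int) (b : Int) (n : Int), Dom_nhithucnewton a b n → Pre_nhithucnewton a b n → Spec_nhithucnewton a b n (nhithucnewton a b n)

-- ===== LEMMAS AND PROOFS =====

theorem bcInner_length (m : Nat) (C : List Int) : (bcInner m C).length = C.length := by
  induction m generalizing C with
  | zero => rfl
  | succ j ih => simp [bcInner, ih]

-- effect of the (descending) inner loop on each entry
theorem bcInner_getD (m : Nat) (C : List Int) (hm : m < C.length) (j : Nat) :
    (bcInner m C).getD j 0 =
      if 1 ≤ j ∧ j ≤ m then C.getD j 0 + C.getD (j - 1) 0 else C.getD j 0 := by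
  induction m generalizing C with
  | zero => rw [bcInner, if_neg (by omega)]
  | succ m ih =>
    rw [bcInner]
    set v := C.getD (m + 1) 0 + C.getD m 0 with hv
    have hne : ∀ (i : Nat), m + 1 ≠ i → (C.set (m + 1) v).getD i 0 = C.getD i 0 := by
      intro i h
      simp [List.getD_eq_getElem?_getD, List.getElem?_set_ne h]
    have hself : (C.set (m + 1) v).getD (m + 1) 0 = v := by
      simp [List.getD_eq_getElem?_getD, List.getElem?_set_self hm]
    have hlen : m < (C.set (m + 1) v).length := by simp; omega
    rw [ih _ hlen]
    by_cases h1 : 1 ≤ j ∧ j ≤ m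
    · rw [if_pos h1, if_pos (show 1 ≤ j ∧ j ≤ m + 1 by omega),
        hne j (by omega), hne (j - 1) (by omega)]
    · by_cases h2 : j = m + 1
      · subst h2
        rw [if_neg (by omega), if_pos (by omega), hself]
        simp [hv]
      · rw [if_neg (by omega), if_neg (by omega), hne j (by omega)]

theorem bc_row_length (k t : Nat) :
    ((List.range t).foldl (fun C i => bcInner (min i k) C)
        ((List.replicate (k + 1) (0 : Int)).set 0 1)).length = k + 1 := by
  induction t with
  | zero => simp
  | succ t ih => rw [List.range_succ, List.foldl_append]; simp [bcInner_length, ih]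

-- the DP state after t outer iterations is row (t-1) of Pascal's triangle
theorem bc_row (k t : Nat) (j : Nat) (hj : j ≤ k) :
    (((List.range t).foldl (fun C i => bcInner (min i k) C)
        ((List.replicate (k + 1) (0 : Int)).set 0 1)).getD j 0)
      = ((t - 1).choose j : Int) := by
  induction t generalizing j with
  | zero =>
    simp only [List.range_zero, List.foldl_nil]
    by_cases h0 : j = 0
    · subst h0
      simp [List.getD_eq_getElem?_getD]
    · rw [List.getD_eq_getElem?_getD, List.getElem?_set_ne (by omega)]
      simp [Nat.lt_succ_of_le hj, Nat.choose_eq_zero_of_lt (show 0 < j by omega)]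
  | succ t ih =>
    rw [List.range_succ, List.foldl_append]
    simp only [List.foldl_cons, List.foldl_nil]
    rw [bcInner_getD (min t k) _ (by rw [bc_row_length]; omega) j]
    by_cases hcase : 1 ≤ j ∧ j ≤ min t k
    · rw [if_pos hcase, ih j hj, ih (j - 1) (by omega)]
      obtain ⟨s, rfl⟩ : ∃ s, t = s + 1 := ⟨t - 1, by omega⟩
      obtain ⟨i, rfl⟩ : ∃ i, j = i + 1 := ⟨j - 1, by omega⟩
      simp only [Nat.add_sub_cancel]
      norm_cast
      simp only [Nat.choose_succ_succ, Nat.succ_eq_add_one]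
      omega
    · rw [if_neg hcase, ih j hj]
      norm_cast
      rcases Nat.eq_zero_or_pos j with rfl | hj0
      · simp
      · have ht : t < j := by omega
        rw [Nat.choose_eq_zero_of_lt (by omega), Nat.choose_eq_zero_of_lt (by omega)]

theorem binomialCoefA_eq (n k : Nat) :
    binomialCoefA (n : Int) (k : Int) = (n.choose k : Int) := by
  unfold binomialCoefA
  simp only [Int.toNat_natCast]
  rw [bc_row k (n + 1) k le_rfl]
  simp

theorem nhLoopA_eq (a b : Int) (n k : Nat) (hk : k ≤ n) (c : Int) :
    nhLoopA a b (n : Int) k c =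
      c + ∑ j ∈ Finset.Ico k (n + 1), (n.choose j : Int) * a ^ (n - j) * b ^ j := by
  obtain ⟨d, hd⟩ : ∃ d, n - k = d := ⟨n - k, rfl⟩
  induction d generalizing k c with
  | zero =>
    have hkn : k = n := by omega
    subst hkn
    rw [nhLoopA, if_neg (lt_irrefl _)]
    rw [Finset.sum_Ico_succ_top le_rfl, Finset.Ico_self, Finset.sum_empty, zero_add]
    rw [binomialCoefA_eq]
    have h1 : ((k : Int) - (k : Int)).toNat = k - k := by omega
    rw [h1]
  | succ d ih =>
    have hkn : k < n := by omega
    rw [nhLoopA, if_pos (by exact_mod_cast hkn)]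
    rw [ih (k + 1) (by omega) _ (by omega)]
    rw [binomialCoefA_eq]
    have h1 : ((n : Int) - (k : Int)).toNat = n - k := by omega
    rw [h1, Finset.sum_eq_sum_Ico_succ_bot (show k < n + 1 by omega)]
    ring

-- ===== VERDICT (by name: the statement is the Claim_ definition above) =====
theorem nhithucnewton_spec : Claim_equal_nhithucnewton := by
  intro a b n _ hn
  unfold Spec_nhithucnewton nhithucnewton nhithucnewton_alt
  obtain ⟨m, rfl⟩ : ∃ m : Nat, n = (m : Int) := ⟨n.toNat, (Int.toNat_of_nonneg hn).symm⟩
  rw [nhLoopA_eq a b m 0 (Nat.zero_le m) 0, zero_add, Int.toNat_natCast]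
  rw [← Finset.range_eq_Ico, add_comm a b, add_pow]
  exact Finset.sum_congr rfl (fun j _ => by ring)
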